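-- pv_equiv track=rewrite | github.com/Baireinhold/humanities-doc-toolkit | src/hdt/classifier/engine.py | _match_folder
-- ===== SOURCE A (Python) =====
-- from typing import Dict, List, Optional, Tuple, Any
--
-- def _match_folder(result: str, folders: List[str]) -> Optional[str]:
--     r = result.strip().strip("\"'")
--     rl = r.lower()
--     for f in folders:
--         if r == f or rl == f.lower():
--             return f
--     for f in folders:
--         fl = f.lower()
--         if rl in fl or fl in rl:
--             return f
--     return None
-- ===== SOURCE B (Python) =====
-- def _match_folder(result, folders):
--     r = result.strip().strip("\"'")
--     rl = r.lower()
--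
--     def rank(f):
--         fl = f.lower()
--         if r == f or rl == fl:
--             return 2
--         if rl in fl or fl in rl:
--             return 1
--         return 0
--
--     best_rank = 0
--     best = None
--     for f in folders:
--         k = rank(f)
--         if k > best_rank:
--             best_rank = k
--             best = f
--     return best
-- ===== Notes on version B (the rewrite author's own statement) =====
-- stated objective: alternative
-- what changed: Replaces A's two staged find-passes (exact then substring) by a one-pass scoring argmax: each folder gets rank 2 (exact), 1 (substring) or 0, and the earliest folder of maximal positive rank is returned.
import Mathlib
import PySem

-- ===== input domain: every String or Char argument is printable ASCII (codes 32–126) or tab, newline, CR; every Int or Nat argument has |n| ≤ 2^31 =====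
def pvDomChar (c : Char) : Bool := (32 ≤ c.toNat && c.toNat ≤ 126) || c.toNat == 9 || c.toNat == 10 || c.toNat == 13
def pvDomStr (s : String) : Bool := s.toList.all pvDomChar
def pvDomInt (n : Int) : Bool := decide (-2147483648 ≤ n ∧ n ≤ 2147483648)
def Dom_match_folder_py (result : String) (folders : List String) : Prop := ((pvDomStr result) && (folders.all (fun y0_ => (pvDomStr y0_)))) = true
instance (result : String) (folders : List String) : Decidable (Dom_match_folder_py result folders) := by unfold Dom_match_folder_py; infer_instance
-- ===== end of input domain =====

-- B replaces A's two staged find-passes by a one-pass scoring argmax (rank 2/1/0,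
-- earliest folder of maximal positive rank). Same return value everywhere.

-- ===== PORT A =====
-- first loop: return f on exact (case-insensitive) equality
def mfA_exact (r rl : String) : List String → Option String
  | [] => none
  | f :: t => if r == f || rl == PySem.Str.lower f then some f else mfA_exact r rl t

-- second loop: return first f related to rl by substring either way
def mfA_sub (rl : String) : List String → Option String
  | [] => none
  | f :: t =>
    let fl := PySem.Str.lower f
    if PySem.Str.isIn rl fl || PySem.Str.isIn fl rl then some f else mfA_sub rl t

def match_folder_py (result : String) (folders : List String) : Option String :=
  let r := PySem.Str.stripChars (PySem.Str.strip result) "\"'"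
  let rl := PySem.Str.lower r
  match mfA_exact r rl folders with
  | some f => some f
  | none => mfA_sub rl folders

-- ===== PORT B =====
-- rank of a folder: 2 = exact match, 1 = substring relation, 0 = unrelated
def mfB_rank (r rl f : String) : Nat :=
  let fl := PySem.Str.lower f
  if r == f || rl == fl then 2
  else if PySem.Str.isIn rl fl || PySem.Str.isIn fl rl then 1
  else 0

-- argmax loop: keep (best_rank, best); update only on a strictly larger rank
def mfB_loop (r rl : String) (br : Nat) (best : Option String) : List String → Option String
  | [] => best
  | f :: t =>
    let k := mfB_rank r rl f
    if k > br then mfB_loop r rl k (some f) t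
    else mfB_loop r rl br best t

def match_folder_py_alt (result : String) (folders : List String) : Option String :=
  let r := PySem.Str.stripChars (PySem.Str.strip result) "\"'"
  let rl := PySem.Str.lower r
  mfB_loop r rl 0 none folders

-- ===== PRECONDITION & SPEC =====
def Spec_match_folder_py (result : String) (folders : List String) (out : Option String) : Prop := out = match_folder_py_alt result folders
instance (result : String) (folders : List String) (out : Option String) : Decidable (Spec_match_folder_py result folders out) := by unfold Spec_match_folder_py; infer_instance

-- ===== CLAIM (what is proved, stated in full; the proofs are below) =====
def Claim_equal_match_folder_py : Prop := ∀ (result : String) (folders : List String), Dom_match_folder_py result folders → Spec_match_folder_py result folders (match_folder_py result folders)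

-- ===== LEMMAS AND PROOFS =====

theorem mfB_rank_le (r rl f : String) : mfB_rank r rl f ≤ 2 := by
  simp only [mfB_rank]; split_ifs <;> omega

-- once a rank-2 element is held, nothing can beat it
theorem mfB_loop_two (r rl : String) (best : Option String) (l : List String) :
    mfB_loop r rl 2 best l = best := by
  induction l with
  | nil => rfl
  | cons f t ih =>
    have h := mfB_rank_le r rl f
    simp only [mfB_loop]
    rw [if_neg (by omega), ih]

-- holding a rank-1 candidate, only a later exact match can replace it
theorem mfB_loop_one (r rl x : String) (l : List String) :
    mfB_loop r rl 1 (some x) l =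
      match mfA_exact r rl l with
      | some g => some g
      | none => some x := by
  induction l with
  | nil => rfl
  | cons f t ih =>
    by_cases h : (r == f || rl == PySem.Str.lower f) = true
    · have hk : mfB_rank r rl f = 2 := by simp [mfB_rank, h]
      simp [mfB_loop, mfA_exact, h, hk, mfB_loop_two]
    · have hk : mfB_rank r rl f ≤ 1 := by
        unfold mfB_rank; rw [if_neg h]; split_ifs <;> omega
      simp only [mfB_loop, mfA_exact, if_neg h]
      rw [if_neg (by omega), ih]

-- the argmax loop from the start state equals: exact pass, else substring pass
theorem mfB_loop_eq (r rl : String) (l : List String) :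
    mfB_loop r rl 0 none l =
      match mfA_exact r rl l with
      | some g => some g
      | none => mfA_sub rl l := by
  induction l with
  | nil => rfl
  | cons f t ih =>
    by_cases h : (r == f || rl == PySem.Str.lower f) = true
    · have hk : mfB_rank r rl f = 2 := by simp [mfB_rank, h]
      simp [mfB_loop, mfA_exact, h, hk, mfB_loop_two]
    · by_cases hs : (PySem.Str.isIn rl (PySem.Str.lower f) || PySem.Str.isIn (PySem.Str.lower f) rl) = true
      · have hk : mfB_rank r rl f = 1 := by
          simp only [mfB_rank]; rw [if_neg h, if_pos hs]
        have hsub : mfA_sub rl (f :: t) = some f := by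
          simp only [mfA_sub]; rw [if_pos hs]
        have hex : mfA_exact r rl (f :: t) = mfA_exact r rl t := by
          simp only [mfA_exact]; rw [if_neg h]
        simp only [mfB_loop, hk]
        rw [if_pos (by omega), mfB_loop_one, hex, hsub]
      · have hk : mfB_rank r rl f = 0 := by
          simp only [mfB_rank]; rw [if_neg h, if_neg hs]
        have hsub : mfA_sub rl (f :: t) = mfA_sub rl t := by
          simp only [mfA_sub]; rw [if_neg hs]
        have hex : mfA_exact r rl (f :: t) = mfA_exact r rl t := by
          simp only [mfA_exact]; rw [if_neg h]
        simp only [mfB_loop, hk]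
        rw [if_neg (by omega), ih, hex, hsub]

-- ===== VERDICT (by name: the statement is the Claim_ definition above) =====
theorem match_folder_py_spec : Claim_equal_match_folder_py := by
  intro result folders _
  unfold Spec_match_folder_py match_folder_py match_folder_py_alt
  rw [mfB_loop_eq]
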